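-- pv_equiv track=rewrite | github.com/qw-chee/lexical | Ccoeff.py | phon_spread
-- ===== SOURCE A (Python) =====
-- def phon_spread(word, neighbours):
--     '''
--     Computes both phonological and orthographic spread.
--     :param word: tokenised word
--     :param neighbours: a list of tokenised neighbours
--     '''
--     count = 0
--     result = 0
--     if len(neighbours) == 0:
--         return 0
--     while count < len(word):
--         sub_neighbours = list(map(lambda x: x[:count] + x[count+1:], neighbours))
--         if (word[:count] + word[count + 1:]) in sub_neighbours:
--             result += 1
--         count += 1
--     return result
-- ===== SOURCE B (Python) =====
-- def phon_spread(word, neighbours):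
--     # One pass per neighbour: classify it once (identical / one mismatch /
--     # word-minus-last-token), mark which deletion positions it satisfies,
--     # then count the marked positions.
--     n = len(word)
--     if n == 0 or not neighbours:
--         return 0
--     marked = [False] * n
--     prefix = word[:n - 1]
--     for x in neighbours:
--         if len(x) == n:
--             diffs = [i for i in range(n) if word[i] != x[i]]
--             if not diffs:
--                 marked = [True] * n
--             elif len(diffs) == 1:
--                 marked[diffs[0]] = True
--         elif len(x) == n - 1 and x == prefix:
--             marked[n - 1] = True
--     return sum(marked)
-- ===== Notes on version B (the rewrite author's own statement) =====
-- stated objective: faster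
-- what changed: Instead of testing every deletion position against all neighbours (rebuilding every neighbour's deletion at every position), B classifies each neighbour once in O(n) (identical to word / exactly one mismatching token / equal to word minus its last token), marks the deletion positions that neighbour satisfies, and finally counts the marked positions.
import Mathlib
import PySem

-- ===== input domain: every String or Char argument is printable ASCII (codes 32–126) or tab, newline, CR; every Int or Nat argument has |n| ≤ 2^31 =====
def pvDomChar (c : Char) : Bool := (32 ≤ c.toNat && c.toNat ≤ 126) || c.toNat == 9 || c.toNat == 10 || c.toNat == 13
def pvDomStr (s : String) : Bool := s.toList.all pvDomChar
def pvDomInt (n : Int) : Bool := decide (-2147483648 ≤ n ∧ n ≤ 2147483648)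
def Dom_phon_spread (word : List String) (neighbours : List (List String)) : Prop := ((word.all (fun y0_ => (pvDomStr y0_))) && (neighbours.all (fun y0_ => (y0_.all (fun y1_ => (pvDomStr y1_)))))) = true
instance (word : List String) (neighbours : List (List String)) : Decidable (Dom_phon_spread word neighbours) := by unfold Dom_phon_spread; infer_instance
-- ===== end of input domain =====

-- B replaces A's per-position scan over all neighbours (O(m·n^2)) by one O(n)
-- classification of each neighbour, marking the deletion positions it satisfies.

-- ===== PORT A =====
def phon_spread (word : List String) (neighbours : List (List String)) : Int :=
  if neighbours.length = 0 then 0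
  else
    (List.range word.length).foldl
      (fun result (count : Nat) =>
        let sub_neighbours := neighbours.map (fun x =>
          PySem.List.slice x none (some (count : Int)) ++
          PySem.List.slice x (some ((count : Int) + 1)) none)
        if (PySem.List.slice word none (some (count : Int)) ++
            PySem.List.slice word (some ((count : Int) + 1)) none) ∈ sub_neighbours
        then result + 1 else result)
      0

-- ===== PORT B =====
-- helper: the loop body of Source B's single pass over the neighbours
def pvDiffs (word x : List String) (n : Nat) : List Nat :=
  (List.range n).filter (fun i => decide (word.getD i "" ≠ x.getD i ""))

def pvStep (word : List String) (n : Nat) (marked : List Bool) (x : List String) : List Bool :=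
  if x.length = n then
    match pvDiffs word x n with
    | [] => List.replicate n true
    | [j] => marked.set j true
    | _ => marked
  else if x.length = n - 1 ∧ x = PySem.List.slice word none (some ((n - 1 : Nat) : Int)) then
    marked.set (n - 1) true
  else marked

def phon_spread_alt (word : List String) (neighbours : List (List String)) : Int :=
  let n := word.length
  if n = 0 ∨ neighbours = [] then 0
  else
    let marked := neighbours.foldl (pvStep word n) (List.replicate n false)
    marked.foldl (fun s b => s + (if b then (1 : Int) else 0)) 0

-- ===== PRECONDITION & SPEC =====
def Spec_phon_spread (word : List String) (neighbours : List (List String)) (out : Int) : Prop := out = phon_spread_alt word neighbours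
instance (word : List String) (neighbours : List (List String)) (out : Int) : Decidable (Spec_phon_spread word neighbours out) := by unfold Spec_phon_spread; infer_instance

-- ===== CLAIM (what is proved, stated in full; the proofs are below) =====
def Claim_equal_phon_spread : Prop := ∀ (word : List String) (neighbours : List (List String)), Dom_phon_spread word neighbours → Spec_phon_spread word neighbours (phon_spread word neighbours)

-- ===== LEMMAS AND PROOFS =====

-- deletion of position i (Python's  ys[:i] + ys[i+1:])
def pvDel (ys : List String) (i : Nat) : List String := ys.take i ++ ys.drop (i + 1)

theorem pvDel_def (ys : List String) (i : Nat) : pvDel ys i = ys.take i ++ ys.drop (i + 1) := rfl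

theorem pvDel_eq_eraseIdx (ys : List String) (i : Nat) : pvDel ys i = ys.eraseIdx i := by
  simp [pvDel, List.eraseIdx_eq_take_drop_succ]

-- core characterisation: which (x, i) pairs satisfy A's membership test
theorem pvDelEq_iff (word x : List String) (i : Nat) (hi : i < word.length) :
    pvDel word i = pvDel x i ↔
      ((x.length = word.length ∧ ∀ j, j < word.length → j ≠ i → word.getD j "" = x.getD j "") ∨
       (x.length = word.length - 1 ∧ i = word.length - 1 ∧ x = word.take (word.length - 1))) := by
  rw [pvDel_eq_eraseIdx, pvDel_eq_eraseIdx]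
  constructor
  · intro h
    have hL : (word.eraseIdx i).length = (x.eraseIdx i).length := by rw [h]
    rw [List.length_eraseIdx, List.length_eraseIdx, if_pos hi] at hL
    by_cases hxi : i < x.length
    · rw [if_pos hxi] at hL
      have hxl : x.length = word.length := by omega
      refine Or.inl ⟨hxl, fun j hj hji => ?_⟩
      rw [List.getD_eq_getElem _ _ hj, List.getD_eq_getElem _ _ (by omega)]
      rcases Nat.lt_or_ge j i with hlt | hge
      · have h1 : j < (word.eraseIdx i).length := by rw [List.length_eraseIdx, if_pos hi]; omega
        have e1 := List.getElem_of_eq h h1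
        rw [List.getElem_eraseIdx, List.getElem_eraseIdx] at e1
        simpa [hlt] using e1
      · have hji' : i < j := by omega
        have h1 : j - 1 < (word.eraseIdx i).length := by rw [List.length_eraseIdx, if_pos hi]; omega
        have e1 := List.getElem_of_eq h h1
        rw [List.getElem_eraseIdx, List.getElem_eraseIdx] at e1
        have hnot : ¬ j - 1 < i := by omega
        simp only [hnot, Nat.sub_add_cancel (by omega : 1 ≤ j)] at e1
        exact e1
    · rw [if_neg hxi] at hL
      rw [List.eraseIdx_of_length_le (show x.length ≤ i by omega)] at h
      have hieq : i = word.length - 1 := by omega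
      refine Or.inr ⟨by omega, hieq, ?_⟩
      rw [← h, hieq, List.eraseIdx_eq_take_drop_succ,
        Nat.sub_add_cancel (by omega : 1 ≤ word.length), List.drop_length, List.append_nil]
  · rintro (⟨hxl, hagree⟩ | ⟨hxl, hieq, hxval⟩)
    · apply List.ext_getElem
      · rw [List.length_eraseIdx, List.length_eraseIdx]; simp [hi, hxl]
      · intro k h1 h2
        rw [List.getElem_eraseIdx, List.getElem_eraseIdx]
        have hk : k < word.length - 1 := by
          rw [List.length_eraseIdx, if_pos hi] at h1; omega
        split
        · have := hagree k (by omega) (by omega)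
          rwa [List.getD_eq_getElem _ _ (by omega),
            List.getD_eq_getElem _ _ (by omega)] at this
        · have := hagree (k + 1) (by omega) (by omega)
          rwa [List.getD_eq_getElem _ _ (by omega),
            List.getD_eq_getElem _ _ (by omega)] at this
    · subst hieq hxval
      rw [List.eraseIdx_of_length_le (le_of_eq hxl), List.eraseIdx_eq_take_drop_succ,
        Nat.sub_add_cancel (by omega : 1 ≤ word.length), List.drop_length, List.append_nil]

-- setting one marked entry, pointwise
theorem set_true_char (f : Nat → Bool) {n j : Nat} (_hjn : j < n) {q : Nat → Prop}
    [DecidablePred q] (hq : ∀ i, i < n → (q i ↔ i = j)) :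
    (List.map f (List.range n)).set j true =
      (List.range n).map (fun i => f i || decide (q i)) := by
  apply List.ext_getElem (by simp)
  intro k h1 h2
  have hk : k < n := by simpa using h2
  rw [List.getElem_set]
  rcases Decidable.em (j = k) with rfl | hjk
  · simp [(hq j hk).2 rfl]
  · have : ¬ q k := fun h => hjk ((hq k hk).1 h).symm
    simp [hjk, this]

-- leaving the marked array unchanged, pointwise
theorem none_char (f : Nat → Bool) {n : Nat} {q : Nat → Prop} [DecidablePred q]
    (hq : ∀ i, i < n → ¬ q i) :
    List.map f (List.range n) = (List.range n).map (fun i => f i || decide (q i)) := by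
  apply List.map_congr_left
  intro i hi
  simp [hq i (by simpa using hi)]

-- step lemma: one neighbour updates the marked array pointwise
theorem pvStep_char (word x : List String) (f : Nat → Bool) :
    pvStep word word.length ((List.range word.length).map f) x =
      (List.range word.length).map (fun i => f i || decide (pvDel word i = pvDel x i)) := by
  have mem_diffs : ∀ m : Nat, m ∈ pvDiffs word x word.length ↔
      m < word.length ∧ word.getD m "" ≠ x.getD m "" := by
    intro m; simp [pvDiffs]
  unfold pvStep
  by_cases hx : x.length = word.length
  · rw [if_pos hx]
    rcases hd : pvDiffs word x word.length with _ | ⟨j, _ | ⟨k, t⟩⟩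
    · simp only []
      have hag : ∀ m, m < word.length → word.getD m "" = x.getD m "" := by
        intro m hm
        by_contra hne
        have := (mem_diffs m).2 ⟨hm, hne⟩
        rw [hd] at this; exact absurd this (List.not_mem_nil)
      have hxw : x = word := by
        apply List.ext_getElem (by omega)
        intro m h1 h2
        have := hag m (by omega)
        rw [List.getD_eq_getElem _ _ (by omega), List.getD_eq_getElem _ _ (by omega)] at this
        exact this.symm
      subst hxw
      simp
    · simp only []
      have hj := (mem_diffs j).1 (by rw [hd]; exact List.mem_singleton_self j)
      have huniq : ∀ m, m < word.length → m ≠ j → word.getD m "" = x.getD m "" := by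
        intro m hm hmj
        by_contra hne
        have := (mem_diffs m).2 ⟨hm, hne⟩
        rw [hd] at this
        exact hmj (List.mem_singleton.1 this)
      apply set_true_char f hj.1
      intro i hi
      rw [pvDelEq_iff word x i hi]
      constructor
      · rintro (⟨_, hagree⟩ | ⟨h1, _, _⟩)
        · by_contra hij
          exact hj.2 (hagree j hj.1 (fun h => hij h.symm))
        · omega
      · rintro rfl
        exact Or.inl ⟨hx, fun m hm hmi => huniq m hm hmi⟩
    · simp only []
      apply none_char
      intro i hi hdel
      have hjk : j ≠ k := by
        have hnd : (pvDiffs word x word.length).Nodup :=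
          List.Nodup.filter _ (List.nodup_range)
        rw [hd] at hnd
        exact fun h => (List.nodup_cons.1 hnd).1 (h ▸ List.mem_cons_self)
      have hj := (mem_diffs j).1 (by rw [hd]; exact List.mem_cons_self)
      have hk := (mem_diffs k).1 (by rw [hd]; exact List.mem_cons_of_mem _ List.mem_cons_self)
      rcases (pvDelEq_iff word x i hi).1 hdel with ⟨_, hagree⟩ | ⟨h1, _, _⟩
      · rcases Decidable.em (j = i) with rfl | hji
        · exact hk.2 (hagree k hk.1 (fun h => hjk h.symm))
        · exact hj.2 (hagree j hj.1 (fun h => hji h))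
      · omega
  · rw [if_neg hx]
    simp only [PySem.List.slice_to_natCast]
    by_cases h2 : x.length = word.length - 1 ∧ x = word.take (word.length - 1)
    · rw [if_pos h2]
      have hn : 0 < word.length := by
        rcases Nat.eq_zero_or_pos word.length with h0 | h0
        · exfalso; apply hx; omega
        · exact h0
      apply set_true_char f (by omega : word.length - 1 < word.length)
      intro i hi
      rw [pvDelEq_iff word x i hi]
      constructor
      · rintro (⟨h1, _⟩ | ⟨_, h1, _⟩)
        · exact absurd h1 hx
        · exact h1
      · rintro rfl
        exact Or.inr ⟨h2.1, rfl, h2.2⟩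
    · rw [if_neg h2]
      apply none_char
      intro i hi hdel
      rcases (pvDelEq_iff word x i hi).1 hdel with ⟨h1, _⟩ | ⟨ha, _, hc⟩
      · exact absurd h1 hx
      · exact h2 ⟨ha, hc⟩

-- fold lemma
theorem pvFold_char (word : List String) (L : List (List String)) (f : Nat → Bool) :
    L.foldl (pvStep word word.length) ((List.range word.length).map f) =
      (List.range word.length).map
        (fun i => f i || L.any (fun x => decide (pvDel word i = pvDel x i))) := by
  induction L generalizing f with
  | nil => simp
  | cons x L ih =>
      simp only [List.foldl_cons, pvStep_char, ih, List.any_cons]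
      exact List.map_congr_left (fun i _ => by
        cases f i <;> cases hx : decide (pvDel word i = pvDel x i) <;> simp)

-- counting: A's 0/1 accumulation equals B's sum over the marked array
theorem pvCount_eq (l : List Nat) (p : Nat → Bool) (s : Int) :
    (l.map p).foldl (fun s b => s + (if b then (1 : Int) else 0)) s =
      l.foldl (fun r c => if p c then r + 1 else r) s := by
  induction l generalizing s with
  | nil => rfl
  | cons a l ih => simp only [List.map_cons, List.foldl_cons, ih]; cases h : p a <;> simp

-- ===== VERDICT (by name: the statement is the Claim_ definition above) =====
theorem phon_spread_spec : Claim_equal_phon_spread := by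
  intro word neighbours _
  unfold Spec_phon_spread
  by_cases hne : neighbours = []
  · subst hne; simp [phon_spread, phon_spread_alt]
  · have hlen : ¬ neighbours.length = 0 := by simpa using hne
    by_cases hn : word.length = 0
    · simp [phon_spread, phon_spread_alt, hn, hne]
    · rw [phon_spread, phon_spread_alt]
      simp only [if_neg hlen]
      rw [if_neg (by push Not; exact ⟨hn, hne⟩)]
      have hrepl : List.replicate word.length false =
          (List.range word.length).map (fun _ => false) := by simp
      rw [hrepl, pvFold_char, pvCount_eq]
      apply PySem.List.foldl_congr_mem
      intro r c _
      refine if_congr ?_ rfl rfl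
      simp only [← Nat.cast_add_one, PySem.List.slice_to_natCast,
        PySem.List.slice_from_natCast, ← pvDel_def, Bool.false_or, List.any_eq_true,
        decide_eq_true_eq, List.mem_map]
      constructor
      · rintro ⟨x, hx, he⟩; exact ⟨x, hx, he.symm⟩
      · rintro ⟨x, hx, he⟩; exact ⟨x, hx, he.symm⟩
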